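-- pv_equiv track=rewrite | github.com/patsteph/LocalBook | backend/api/browser.py | _is_document_url
-- ===== SOURCE A (Python) =====
-- from typing import Optional, List
--
-- def _is_document_url(url: str) -> Optional[str]:
--     """Detect if a URL points to a downloadable document.
--
--     Returns the file type string if detected, None otherwise.
--     """
--     if not url:
--         return None
--     url_lower = url.lower().split('?')[0].split('#')[0]
--
--     # Direct file extensions
--     for ext, ftype in [('.pdf', 'pdf'), ('.pptx', 'pptx'), ('.docx', 'docx'),
--                        ('.xlsx', 'xlsx'), ('.doc', 'doc'), ('.ppt', 'ppt')]:
--         if url_lower.endswith(ext):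
--             return ftype
--
--     return None
-- ===== SOURCE B (Python) =====
-- from typing import Optional
--
-- _DOC_TYPES = {'pdf': 'pdf', 'pptx': 'pptx', 'docx': 'docx',
--               'xlsx': 'xlsx', 'doc': 'doc', 'ppt': 'ppt'}
--
-- def _is_document_url(url: str) -> Optional[str]:
--     """Detect if a URL points to a downloadable document.
--
--     Single backward scan for the last '.', then one dict lookup on the
--     extracted extension (instead of testing six candidate suffixes).
--     """
--     s = url.lower().split('?')[0].split('#')[0]
--     ext_rev = []
--     for ch in reversed(s):
--         if ch == '.':
--             return _DOC_TYPES.get(''.join(reversed(ext_rev)))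
--         ext_rev.append(ch)
--     return None
-- ===== Notes on version B (the rewrite author's own statement) =====
-- stated objective: alternative
-- what changed: Replaced the six endswith suffix tests by a single backward scan that extracts the text after the last dot and one dict lookup on that extension.
import Mathlib
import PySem

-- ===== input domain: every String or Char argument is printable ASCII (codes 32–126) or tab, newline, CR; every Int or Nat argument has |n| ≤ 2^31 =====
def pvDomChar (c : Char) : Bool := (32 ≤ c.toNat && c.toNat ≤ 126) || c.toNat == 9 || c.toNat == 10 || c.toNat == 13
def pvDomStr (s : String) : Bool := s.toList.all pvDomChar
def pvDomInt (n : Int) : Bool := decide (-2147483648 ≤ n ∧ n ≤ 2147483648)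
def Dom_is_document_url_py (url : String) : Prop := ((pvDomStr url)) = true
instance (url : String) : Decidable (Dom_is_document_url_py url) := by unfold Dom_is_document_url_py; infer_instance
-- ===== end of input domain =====

-- B replaces A's six endswith suffix tests by one backward scan for the last '.' plus one dict lookup (alternative; equal return value).

-- ===== PORT A =====
-- s.split(sep)[0]: split? is some for sep ≠ "" and the result is never empty, so the defaults are never hit
def pvFirstPart (s : String) (sep : String) : String :=
  (((PySem.Str.split? s sep).getD [s]).headD s)

def is_document_url_py (url : String) : Option String :=
  if url = "" then none
  else
    let url_lower := pvFirstPart (pvFirstPart (PySem.Str.lower url) "?") "#"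
    if PySem.Str.endswith url_lower ".pdf" then some "pdf"
    else if PySem.Str.endswith url_lower ".pptx" then some "pptx"
    else if PySem.Str.endswith url_lower ".docx" then some "docx"
    else if PySem.Str.endswith url_lower ".xlsx" then some "xlsx"
    else if PySem.Str.endswith url_lower ".doc" then some "doc"
    else if PySem.Str.endswith url_lower ".ppt" then some "ppt"
    else none

-- ===== PORT B =====
def pvDocTypes : PySem.Dict String String :=
  PySem.Dict.ofList [("pdf", "pdf"), ("pptx", "pptx"), ("docx", "docx"),
                     ("xlsx", "xlsx"), ("doc", "doc"), ("ppt", "ppt")]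

-- the 'for ch in reversed(s)' loop of Source B: acc collects the chars seen before the first '.' of the reversed string
def pvScanExt : List Char → List Char → Option (List Char)
  | [], _ => none
  | c :: rest, acc => if c = '.' then some acc else pvScanExt rest (acc ++ [c])

-- the loop body applied to the cleaned string: scan backwards, then one dict lookup
def pvLookupExt (s : String) : Option String :=
  match pvScanExt s.toList.reverse [] with
  | none => none
  | some extRev => pvDocTypes.get? (String.ofList extRev.reverse)

def is_document_url_py_alt (url : String) : Option String :=
  pvLookupExt (pvFirstPart (pvFirstPart (PySem.Str.lower url) "?") "#")

-- ===== PRECONDITION & SPEC =====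
def Spec_is_document_url_py (url : String) (out : Option String) : Prop := out = is_document_url_py_alt url
instance (url : String) (out : Option String) : Decidable (Spec_is_document_url_py url out) := by unfold Spec_is_document_url_py; infer_instance

-- ===== CLAIM (what is proved, stated in full; the proofs are below) =====
def Claim_equal_is_document_url_py : Prop := ∀ (url : String), Dom_is_document_url_py url → Spec_is_document_url_py url (is_document_url_py url)

-- ===== LEMMAS AND PROOFS =====

theorem pvScanExt_spec (rev acc : List Char) :
    pvScanExt rev acc =
      if '.' ∈ rev then some (acc ++ rev.takeWhile (· ≠ '.')) else none := by
  induction rev generalizing acc with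
  | nil => simp [pvScanExt]
  | cons c rest ih =>
    by_cases hc : c = '.'
    · subst hc; simp [pvScanExt]
    · simp [pvScanExt, hc, ih, List.mem_cons, Ne.symm hc]

-- '.'-suffix test characterised by the last-dot extension
theorem pvEndswith_iff (L e : List Char) (he : '.' ∉ e) :
    ('.' :: e) <:+ L ↔ '.' ∈ L ∧ (L.reverse.takeWhile (· ≠ '.')).reverse = e := by
  constructor
  · rintro ⟨p, rfl⟩
    refine ⟨by simp, ?_⟩
    have hrev : (p ++ '.' :: e).reverse = e.reverse ++ '.' :: p.reverse := by simp
    rw [hrev, List.takeWhile_append]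
    have h1 : e.reverse.takeWhile (· ≠ '.') = e.reverse := by
      rw [List.takeWhile_eq_self_iff]
      intro x hx
      simp only [decide_eq_true_eq, ne_eq]
      intro h; exact he (by simpa [h] using List.mem_reverse.mp hx)
    rw [h1]
    simp
  · rintro ⟨hmem, hext⟩
    have hmemr : '.' ∈ L.reverse := List.mem_reverse.mpr hmem
    have hdw : L.reverse.dropWhile (· ≠ '.') ≠ [] := by
      intro hnil
      have h := (List.dropWhile_eq_nil_iff).mp hnil
      have := h '.' hmemr
      simp at this
    obtain ⟨d, rest, hdr⟩ := List.exists_cons_of_ne_nil hdw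
    have hd : d = '.' := by
      have h := List.head_dropWhile_not (p := fun c => decide (c ≠ '.')) (l := L.reverse) hdw
      simp only [hdr] at h
      simpa using h
    have hsplit : L.reverse = L.reverse.takeWhile (· ≠ '.') ++ '.' :: rest := by
      conv_lhs => rw [← List.takeWhile_append_dropWhile (p := fun c => decide (c ≠ '.')) (l := L.reverse)]
      rw [hdr, hd]
    have hL : L = rest.reverse ++ '.' :: (L.reverse.takeWhile (· ≠ '.')).reverse := by
      have := congrArg List.reverse hsplit
      simpa using this
    rw [hL, hext]
    exact ⟨rest.reverse, rfl⟩

-- both ports as functions of the cleaned string's last-dot extension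
theorem pvMain (s : String) :
    (if PySem.Str.endswith s ".pdf" then some "pdf"
     else if PySem.Str.endswith s ".pptx" then some "pptx"
     else if PySem.Str.endswith s ".docx" then some "docx"
     else if PySem.Str.endswith s ".xlsx" then some "xlsx"
     else if PySem.Str.endswith s ".doc" then some "doc"
     else if PySem.Str.endswith s ".ppt" then some "ppt"
     else none) = pvLookupExt s := by
  unfold pvLookupExt
  have hbr : ∀ e : List Char,
      PySem.Str.endswith s (String.ofList ('.' :: e)) = true ↔ ('.' :: e) <:+ s.toList := by
    intro e
    rw [show PySem.Str.endswith s (String.ofList ('.' :: e)) = PySem.Chars.endswith s.toList ('.' :: e) from by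
      simp [PySem.Str.endswith_eq]]
    exact PySem.Chars.endswith_iff _ _
  have lit1 : (".pdf" : String) = String.ofList ['.','p','d','f'] := by decide
  have lit2 : (".pptx" : String) = String.ofList ['.','p','p','t','x'] := by decide
  have lit3 : (".docx" : String) = String.ofList ['.','d','o','c','x'] := by decide
  have lit4 : (".xlsx" : String) = String.ofList ['.','x','l','s','x'] := by decide
  have lit5 : (".doc" : String) = String.ofList ['.','d','o','c'] := by decide
  have lit6 : (".ppt" : String) = String.ofList ['.','p','p','t'] := by decide
  rw [lit1, lit2, lit3, lit4, lit5, lit6]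
  by_cases hmem : '.' ∈ s.toList.reverse
  · rw [pvScanExt_spec]
    simp only [hmem, if_pos, List.nil_append]
    set ext : List Char := (s.toList.reverse.takeWhile (· ≠ '.')).reverse with hext
    have hmem' : '.' ∈ s.toList := List.mem_reverse.mp hmem
    have hcond : ∀ e : List Char, '.' ∉ e →
        (PySem.Str.endswith s (String.ofList ('.' :: e)) = true ↔ ext = e) := by
      intro e he
      rw [hbr, pvEndswith_iff _ _ he]
      constructor
      · rintro ⟨_, h⟩; exact h
      · intro h; exact ⟨hmem', h⟩
    have d1 := hcond ['p','d','f'] (by decide)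
    have d2 := hcond ['p','p','t','x'] (by decide)
    have d3 := hcond ['d','o','c','x'] (by decide)
    have d4 := hcond ['x','l','s','x'] (by decide)
    have d5 := hcond ['d','o','c'] (by decide)
    have d6 := hcond ['p','p','t'] (by decide)
    show _ = pvDocTypes.get? (String.ofList ext)
    by_cases h1 : ext = ['p','d','f']
    · rw [if_pos (d1.mpr h1), h1]; rfl
    by_cases h2 : ext = ['p','p','t','x']
    · rw [if_neg (by simp only [d1]; exact h1), if_pos (d2.mpr h2), h2]; rfl
    by_cases h3 : ext = ['d','o','c','x']
    · rw [if_neg (by simp only [d1]; exact h1), if_neg (by simp only [d2]; exact h2), if_pos (d3.mpr h3), h3]; rfl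
    by_cases h4 : ext = ['x','l','s','x']
    · rw [if_neg (by simp only [d1]; exact h1), if_neg (by simp only [d2]; exact h2), if_neg (by simp only [d3]; exact h3),
        if_pos (d4.mpr h4), h4]; rfl
    by_cases h5 : ext = ['d','o','c']
    · rw [if_neg (by simp only [d1]; exact h1), if_neg (by simp only [d2]; exact h2), if_neg (by simp only [d3]; exact h3),
        if_neg (by simp only [d4]; exact h4), if_pos (d5.mpr h5), h5]; rfl
    by_cases h6 : ext = ['p','p','t']
    · rw [if_neg (by simp only [d1]; exact h1), if_neg (by simp only [d2]; exact h2), if_neg (by simp only [d3]; exact h3),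
        if_neg (by simp only [d4]; exact h4), if_neg (by simp only [d5]; exact h5), if_pos (d6.mpr h6), h6]; rfl
    · rw [if_neg (by simp only [d1]; exact h1), if_neg (by simp only [d2]; exact h2), if_neg (by simp only [d3]; exact h3),
        if_neg (by simp only [d4]; exact h4), if_neg (by simp only [d5]; exact h5), if_neg (by simp only [d6]; exact h6)]
      -- ext matches no key, so the dict lookup misses too
      have n1 : ("pdf" : String) ≠ String.ofList ext := fun h => h1 (by simpa using (congrArg String.toList h).symm)
      have n2 : ("pptx" : String) ≠ String.ofList ext := fun h => h2 (by simpa using (congrArg String.toList h).symm)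
      have n3 : ("docx" : String) ≠ String.ofList ext := fun h => h3 (by simpa using (congrArg String.toList h).symm)
      have n4 : ("xlsx" : String) ≠ String.ofList ext := fun h => h4 (by simpa using (congrArg String.toList h).symm)
      have n5 : ("doc" : String) ≠ String.ofList ext := fun h => h5 (by simpa using (congrArg String.toList h).symm)
      have n6 : ("ppt" : String) ≠ String.ofList ext := fun h => h6 (by simpa using (congrArg String.toList h).symm)
      rw [show pvDocTypes = PySem.Dict.mk [("pdf", "pdf"), ("pptx", "pptx"), ("docx", "docx"),
            ("xlsx", "xlsx"), ("doc", "doc"), ("ppt", "ppt")] from by decide]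
      simp [PySem.Dict.get?, n1, n2, n3, n4, n5, n6]
  · rw [pvScanExt_spec, if_neg hmem]
    have hno : ∀ e : List Char, PySem.Str.endswith s (String.ofList ('.' :: e)) = false := by
      intro e
      rw [Bool.eq_false_iff]
      intro h
      obtain ⟨p, hp⟩ := (hbr e).mp h
      exact hmem (List.mem_reverse.mpr (by rw [← hp]; simp))
    simp only [hno]
    rfl

-- ===== VERDICT (by name: the statement is the Claim_ definition above) =====
theorem is_document_url_py_spec : Claim_equal_is_document_url_py := by
  intro url _
  unfold Spec_is_document_url_py
  by_cases hu : url = ""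
  · subst hu; decide
  · show is_document_url_py url = is_document_url_py_alt url
    have h : is_document_url_py url =
        (if PySem.Str.endswith (pvFirstPart (pvFirstPart (PySem.Str.lower url) "?") "#") ".pdf" then some "pdf"
         else if PySem.Str.endswith (pvFirstPart (pvFirstPart (PySem.Str.lower url) "?") "#") ".pptx" then some "pptx"
         else if PySem.Str.endswith (pvFirstPart (pvFirstPart (PySem.Str.lower url) "?") "#") ".docx" then some "docx"
         else if PySem.Str.endswith (pvFirstPart (pvFirstPart (PySem.Str.lower url) "?") "#") ".xlsx" then some "xlsx"
         else if PySem.Str.endswith (pvFirstPart (pvFirstPart (PySem.Str.lower url) "?") "#") ".doc" then some "doc"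
         else if PySem.Str.endswith (pvFirstPart (pvFirstPart (PySem.Str.lower url) "?") "#") ".ppt" then some "ppt"
         else none) := by rw [is_document_url_py, if_neg hu]
    rw [h, is_document_url_py_alt]
    exact pvMain (pvFirstPart (pvFirstPart (PySem.Str.lower url) "?") "#")
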